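-- pv_equiv track=rewrite | github.com/mbendjilali/supergaussian_transformer | src/utils/cpp/test_hgmm.py | make_hierarchy
-- ===== SOURCE A (Python) =====
-- def make_hierarchy(approx_cluster_size, depth):
--     """
--     Generate a hierarchy of integers whose product approximates the target cluster size.
--
--     Args:
--         approx_cluster_size (int): Target cluster size to approximate
--         depth (int): Number of levels in the hierarchy
--
--     Returns:
--         list[int]: List of integers in descending order whose product is the nearest
--                    power of 2 less than or equal to approx_cluster_size
--     """
--     # Find the nearest power of 2 less than or equal to approx_cluster_size
--     target = 2 ** (approx_cluster_size.bit_length() - 1)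
--     if target > approx_cluster_size:
--         target >>= 1
--
--     # Find the nth root rounded down to nearest power of 2
--     base = 2 ** ((target.bit_length() - 1) // depth)
--
--     # Initialize result with base values
--     result = [base] * depth
--
--     # Distribute remaining factors (always powers of 2) to maximize first elements
--     remaining_power = (target // (base ** depth)).bit_length() - 1
--     for i in range(remaining_power):
--         idx = i % depth
--         result[idx] *= 2
--
--     # Sort in descending order
--     result.sort(reverse=True)
--     return result
-- ===== SOURCE B (Python) =====
-- def make_hierarchy(approx_cluster_size, depth):
--     # Same target computation as A; then build the descending list in closed
--     # form from divmod instead of round-robin doubling + sort.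
--     target = 2 ** (approx_cluster_size.bit_length() - 1)
--     if target > approx_cluster_size:
--         target >>= 1
--     total_power = target.bit_length() - 1
--     q, r = divmod(total_power, depth)
--     return [2 ** (q + 1)] * r + [2 ** q] * (depth - r)
-- ===== Notes on version B (the rewrite author's own statement) =====
-- stated objective: simpler
-- what changed: B keeps A's target computation but replaces the round-robin doubling loop over range(remaining_power) plus the final descending sort by a closed-form divmod of the total power of two: it returns [2**(q+1)]*r + [2**q]*(depth-r) directly.
-- outside the precondition, e.g. on make_hierarchy(7, 0): A raises ZeroDivisionError, B raises ZeroDivisionError; on make_hierarchy(0, 2): A raises TypeError, B raises TypeError; on make_hierarchy(-1, 2): A raises AttributeError, B returns [1, 0.5]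
import Mathlib
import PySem

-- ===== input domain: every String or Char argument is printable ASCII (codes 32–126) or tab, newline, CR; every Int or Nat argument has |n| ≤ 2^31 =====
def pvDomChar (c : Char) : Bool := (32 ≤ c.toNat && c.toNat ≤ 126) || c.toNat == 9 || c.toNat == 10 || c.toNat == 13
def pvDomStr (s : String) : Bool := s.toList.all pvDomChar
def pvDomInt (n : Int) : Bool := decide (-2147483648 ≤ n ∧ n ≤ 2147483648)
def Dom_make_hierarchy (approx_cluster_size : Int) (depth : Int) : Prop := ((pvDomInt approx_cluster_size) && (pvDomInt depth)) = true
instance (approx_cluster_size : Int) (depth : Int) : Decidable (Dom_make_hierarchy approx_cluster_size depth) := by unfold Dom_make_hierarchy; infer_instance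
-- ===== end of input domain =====

-- B replaces A's round-robin doubling loop + descending sort by a closed-form
-- divmod construction of the same descending list (objective: simpler).

-- ===== PORT A =====
-- `2 ** e`: Python yields a float for e < 0, on which A then raises
-- (TypeError/AttributeError); those inputs are excluded by Pre_, so the
-- nonnegative-exponent reading `2 ^ e.toNat` is exact on all admitted inputs.
def pvPow2 (e : Int) : Int := 2 ^ e.toNat

def make_hierarchy (approx_cluster_size : Int) (depth : Int) : List Int :=
  let target0 : Int := pvPow2 ((PySem.Int.bitLength approx_cluster_size : Int) - 1)
  -- `if target > approx_cluster_size: target >>= 1`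
  let target : Int := if target0 > approx_cluster_size then target0 >>> (1:Nat) else target0
  let base : Int := pvPow2 (PySem.Int.floordiv ((PySem.Int.bitLength target : Int) - 1) depth)
  -- `result = [base] * depth`
  let result : List Int := List.replicate depth.toNat base
  -- `base ** depth` (depth ≥ 1 inside Pre_, so the Nat exponent is exact)
  let remaining_power : Int := (PySem.Int.bitLength (PySem.Int.floordiv target (base ^ depth.toNat)) : Int) - 1
  -- `for i in range(remaining_power): result[i % depth] *= 2`
  let result := (PySem.List.pyRange 0 remaining_power 1).foldl
      (fun res i => res.modify (PySem.Int.mod i depth).toNat (· * 2)) result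
  -- `result.sort(reverse=True)`
  PySem.List.sorted result (fun x => x) true

-- ===== PORT B =====
def make_hierarchy_alt (approx_cluster_size : Int) (depth : Int) : List Int :=
  let target0 : Int := pvPow2 ((PySem.Int.bitLength approx_cluster_size : Int) - 1)
  let target : Int := if target0 > approx_cluster_size then target0 >>> (1:Nat) else target0
  let total_power : Int := (PySem.Int.bitLength target : Int) - 1
  -- `q, r = divmod(total_power, depth)`
  let q : Int := PySem.Int.floordiv total_power depth
  let r : Int := PySem.Int.mod total_power depth
  -- `[2 ** (q + 1)] * r + [2 ** q] * (depth - r)`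
  List.replicate r.toNat (pvPow2 (q + 1)) ++ List.replicate (depth - r).toNat (pvPow2 q)

-- ===== PRECONDITION & SPEC =====
-- A raises on every excluded input: ZeroDivisionError for depth = 0, and for
-- depth < 0 or approx_cluster_size ∈ {0, -1} a float reaches `>>=` / `**` /
-- `.bit_length()` (TypeError/AttributeError); Pre_ is exactly where the Python A
-- returns normally.
def Pre_make_hierarchy (approx_cluster_size : Int) (depth : Int) : Prop :=
  1 ≤ depth ∧ approx_cluster_size ≠ 0 ∧ approx_cluster_size ≠ -1
instance (approx_cluster_size : Int) (depth : Int) : Decidable (Pre_make_hierarchy approx_cluster_size depth) := by unfold Pre_make_hierarchy; infer_instance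
def pvWitness_make_hierarchy : Int × Int := (100, 3)

def Spec_make_hierarchy (approx_cluster_size : Int) (depth : Int) (out : List Int) : Prop := out = make_hierarchy_alt approx_cluster_size depth
instance (approx_cluster_size : Int) (depth : Int) (out : List Int) : Decidable (Spec_make_hierarchy approx_cluster_size depth out) := by unfold Spec_make_hierarchy; infer_instance

-- ===== CLAIM (what is proved, stated in full; the proofs are below) =====
def Claim_equal_make_hierarchy : Prop := ∀ (approx_cluster_size : Int) (depth : Int), Dom_make_hierarchy approx_cluster_size depth → Pre_make_hierarchy approx_cluster_size depth → Spec_make_hierarchy approx_cluster_size depth (make_hierarchy approx_cluster_size depth)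

-- ===== LEMMAS AND PROOFS =====

-- `2^(k+1) >> 1 = 2^k` on Int
theorem pv_pow2_shift (k : Nat) : ((2:Int) ^ (k+1)) >>> (1:Nat) = 2 ^ k := by
  have h : ((2:Int) ^ (k+1)) = ((2^(k+1) : Nat) : Int) := by push_cast; ring
  rw [h]
  rw [show ((2^(k+1):Nat):Int) >>> (1:Nat) = ((2^(k+1) >>> 1 : Nat) : Int) from Int.mem_toNat?.mp rfl]
  simp [Nat.shiftRight_succ, Nat.pow_succ]

-- `(2^t).bit_length() = t + 1`
theorem pv_bitLength_two_pow (t : Nat) : PySem.Int.bitLength ((2:Int) ^ t) = t + 1 := by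
  induction t with
  | zero => decide
  | succ k ih =>
    have h : ((2:Int) ^ (k+1)) = ((2^(k+1) : Nat) : Int) := by push_cast; ring
    rw [h, PySem.Int.bitLength_natCast (by positivity)]
    have h2 : (2^(k+1) / 2 : Nat) = 2^k := by omega
    rw [h2]
    have h3 : ((2^k : Nat) : Int) = (2:Int)^k := by push_cast; ring
    rw [h3, ih]

-- exponent of the power of two that `target` becomes
def pvT (acs : Int) : Nat :=
  if 1 ≤ acs then PySem.Int.bitLength acs - 1 else PySem.Int.bitLength acs - 2

-- the `target` both ports compute is the power of two 2 ^ pvT acs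
theorem pv_target_eq (acs : Int) (h0 : acs ≠ 0) (h1 : acs ≠ -1) :
    (if pvPow2 ((PySem.Int.bitLength acs : Int) - 1) > acs
       then pvPow2 ((PySem.Int.bitLength acs : Int) - 1) >>> (1:Nat)
       else pvPow2 ((PySem.Int.bitLength acs : Int) - 1)) = (2:Int) ^ pvT acs := by
  have hlt := PySem.Int.lt_two_pow_bitLength acs
  have hle := PySem.Int.two_pow_bitLength_le acs h0
  set bl := PySem.Int.bitLength acs with hbl
  by_cases hpos : 1 ≤ acs
  · have hbl1 : 1 ≤ bl := by
      rcases Nat.eq_zero_or_pos bl with h | h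
      · rw [h] at hlt; simp at hlt; omega
      · exact h
    have hval : pvPow2 ((bl : Int) - 1) = (2:Int) ^ (bl - 1) := by
      have h4 : ((bl : Int) - 1).toNat = bl - 1 := by omega
      simp [pvPow2, h4]
    have hnat : acs.natAbs = acs.toNat := by omega
    have h2 : ((2:Int) ^ (bl-1)) ≤ acs := by
      rw [hnat] at hle
      have h5 : ((2^(bl-1) : Nat) : Int) ≤ (acs.toNat : Int) := by exact_mod_cast hle
      push_cast at h5
      omega
    rw [if_neg (by rw [hval]; omega), hval, pvT, if_pos hpos]
  · have habs : 2 ≤ acs.natAbs := by omega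
    have hbl2 : 2 ≤ bl := by
      rcases Nat.lt_or_ge bl 2 with h | h
      · exfalso; interval_cases bl <;> omega
      · exact h
    have hval : pvPow2 ((bl : Int) - 1) = (2:Int) ^ (bl - 1) := by
      have h4 : ((bl : Int) - 1).toNat = bl - 1 := by omega
      simp [pvPow2, h4]
    have hyes : pvPow2 ((bl : Int) - 1) > acs := by
      rw [hval]
      have h6 : (0:Int) < 2 ^ (bl-1) := by positivity
      omega
    rw [if_pos hyes, hval, pvT, if_neg hpos,
        show bl - 1 = (bl - 2) + 1 by omega, pv_pow2_shift]

-- `result[k] *= 2` on the first un-doubled slot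
theorem pv_modify_replicate (k s : Nat) (x y : Int) :
    (List.replicate k x ++ y :: List.replicate s y).modify k (· * 2) =
      List.replicate k x ++ y * 2 :: List.replicate s y := by
  induction k with
  | zero => simp
  | succ n ih => simp [List.replicate_succ, ih]

-- the round-robin loop doubles exactly the first k slots (k ≤ dn)
theorem pv_loop (d : Int) (dn : Nat) (hd : d = (dn : Int)) (b : Int)
    (k : Nat) (hk : k ≤ dn) :
    (PySem.List.pyRange 0 (k : Int) 1).foldl
        (fun res i => res.modify (PySem.Int.mod i d).toNat (· * 2)) (List.replicate dn b) =
      List.replicate k (b * 2) ++ List.replicate (dn - k) b := by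
  induction k with
  | zero => simp [PySem.List.pyRange_one_eq_nil]
  | succ n ih =>
    have hn : n ≤ dn := by omega
    have hcast : ((n+1 : Nat) : Int) = (n : Int) + 1 := by push_cast; ring
    rw [hcast, PySem.List.pyRange_one_succ_right (by positivity), List.foldl_append, ih hn]
    simp only [List.foldl_cons, List.foldl_nil]
    have hmod : (PySem.Int.mod (n : Int) d).toNat = n := by
      rw [hd, PySem.Int.mod_natCast]
      simp [Nat.mod_eq_of_lt (by omega : n < dn)]
    rw [hmod]
    rw [show dn - n = (dn - n - 1) + 1 by omega, List.replicate_succ, pv_modify_replicate]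
    simp [List.replicate_succ']
    omega

-- a [big, …, big, small, …, small] list is its own descending sort
theorem pv_sorted_desc (r s : Nat) (b : Int) (hb : 0 ≤ b) :
    PySem.List.sorted (List.replicate r (b*2) ++ List.replicate s b) (fun x => x) true
      = List.replicate r (b*2) ++ List.replicate s b := by
  apply PySem.List.sorted_rev_eq_self_of_pairwise
  rw [List.pairwise_append]
  refine ⟨?_, ?_, ?_⟩
  · rw [List.pairwise_replicate]; omega
  · rw [List.pairwise_replicate]; omega
  · intro x hx y hy
    rw [List.eq_of_mem_replicate hx, List.eq_of_mem_replicate hy]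
    omega

theorem pv_main (acs d : Int) (hd1 : 1 ≤ d) (h0 : acs ≠ 0) (h1 : acs ≠ -1) :
    make_hierarchy acs d = make_hierarchy_alt acs d := by
  obtain ⟨dn, rfl⟩ : ∃ dn : Nat, d = (dn : Int) := ⟨d.toNat, by omega⟩
  have hdnpos : 0 < dn := by omega
  obtain ⟨t, htarget⟩ : ∃ t : Nat,
      (if pvPow2 ((PySem.Int.bitLength acs : Int) - 1) > acs
         then pvPow2 ((PySem.Int.bitLength acs : Int) - 1) >>> (1:Nat)
         else pvPow2 ((PySem.Int.bitLength acs : Int) - 1)) = (2:Int) ^ t :=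
    ⟨pvT acs, pv_target_eq acs h0 h1⟩
  unfold make_hierarchy make_hierarchy_alt
  simp only [htarget, pv_bitLength_two_pow]
  have hc1 : ((t + 1 : Nat) : Int) - 1 = ((t : Nat) : Int) := by push_cast; ring
  rw [hc1, PySem.Int.floordiv_natCast, PySem.Int.mod_natCast]
  have hbase : pvPow2 ((t / dn : Nat) : Int) = (2:Int) ^ (t / dn) := by
    simp only [pvPow2, Int.toNat_natCast]
  rw [hbase]
  have hpow : ((2:Int) ^ (t / dn)) ^ ((dn : Int)).toNat = (((2:Nat) ^ (t / dn * dn) : Nat) : Int) := by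
    rw [Int.toNat_natCast]
    push_cast
    rw [← pow_mul]
  rw [hpow]
  have hcast2 : (2:Int) ^ t = (((2:Nat) ^ t : Nat) : Int) := by push_cast; ring
  rw [hcast2, PySem.Int.floordiv_natCast]
  have hdivmod : (2:Nat) ^ t / 2 ^ (t / dn * dn) = 2 ^ (t % dn) := by
    rw [Nat.pow_div (Nat.div_mul_le_self t dn) (by norm_num)]
    congr 1
    have h := Nat.div_add_mod t dn
    have h2 : t / dn * dn = dn * (t / dn) := Nat.mul_comm _ _
    omega
  rw [hdivmod]
  have hcast3 : (((2:Nat) ^ (t % dn) : Nat) : Int) = (2:Int) ^ (t % dn) := by push_cast; ring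
  rw [hcast3, pv_bitLength_two_pow]
  have hc4 : ((t % dn + 1 : Nat) : Int) - 1 = ((t % dn : Nat) : Int) := by push_cast; ring
  rw [hc4]
  have hrlt : t % dn < dn := Nat.mod_lt _ hdnpos
  rw [Int.toNat_natCast, pv_loop ((dn:Int)) dn rfl _ (t % dn) (le_of_lt hrlt)]
  rw [pv_sorted_desc _ _ _ (by positivity)]
  have hq1 : pvPow2 (((t / dn : Nat) : Int) + 1) = (2:Int) ^ (t / dn) * 2 := by
    have h5 : (((t / dn : Nat) : Int) + 1).toNat = t / dn + 1 := by
      rw [show ((t / dn : Nat) : Int) + 1 = ((t / dn + 1 : Nat) : Int) by push_cast; ring, Int.toNat_natCast]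
    show (2:Int) ^ ((((t / dn : Nat) : Int) + 1)).toNat = _
    rw [h5, pow_succ]
  have hr : (((t % dn : Nat) : Int)).toNat = t % dn := Int.toNat_natCast _
  have hs : (((dn : Nat) : Int) - ((t % dn : Nat) : Int)).toNat = dn - t % dn := by
    have hrlt' : t % dn ≤ dn := le_of_lt hrlt
    rw [show ((dn : Nat) : Int) - ((t % dn : Nat) : Int) = ((dn - t % dn : Nat) : Int) by push_cast [hrlt']; ring, Int.toNat_natCast]
  rw [hq1, hr, hs]

-- ===== VERDICT (by name: the statement is the Claim_ definition above) =====
theorem make_hierarchy_spec : Claim_equal_make_hierarchy := by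
  intro acs d _ hpre
  obtain ⟨hd1, h0, h1⟩ := hpre
  exact pv_main acs d hd1 h0 h1
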